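-- pv_equiv track=rewrite | github.com/irrso/algorithm | 프로그래머스/2/388352. 비밀 코드 해독/비밀 코드 해독.py | solution
-- ===== SOURCE A (Python) =====
-- from itertools import combinations
--
-- def solution(n, q, ans):
--     answer = 0
--
--     for comb in combinations(range(1, n+1), 5):
--         is_possible = True
--         for question, system in zip(q, ans):
--             if len(set(question) & set(comb)) != system:
--                 is_possible = False
--                 break
--         if is_possible:
--             answer += 1
--
--     return answer
-- ===== SOURCE B (Python) =====
-- def solution(n, q, ans):
--     # state: one (query-set, target, running-overlap) triple per query
--     st = [(set(question), system, 0) for question, system in zip(q, ans)]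
--
--     def dfs(start, r, st):
--         # prune: overlap already too big, or target unreachable with r picks left
--         for qset, target, cnt in st:
--             if cnt > target or target - cnt > r:
--                 return 0
--         if r == 0:
--             return 1  # prune check above guarantees cnt == target for all queries
--         total = 0
--         for v in range(start, n + 1):
--             total += dfs(v + 1, r - 1,
--                          [(s, t, c + (1 if v in s else 0)) for s, t, c in st])
--         return total
--
--     return dfs(1, 5, st)
-- ===== Notes on version B (the rewrite author's own statement) =====
-- stated objective: alternative
-- what changed: Replaced the itertools.combinations enumeration with its per-combination set-intersection re-check by a recursive backtracking search over increasing picks that threads a running overlap count per query and prunes a branch as soon as a query's overlap exceeds its target or the target is unreachable with the picks remaining.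
import Mathlib
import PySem

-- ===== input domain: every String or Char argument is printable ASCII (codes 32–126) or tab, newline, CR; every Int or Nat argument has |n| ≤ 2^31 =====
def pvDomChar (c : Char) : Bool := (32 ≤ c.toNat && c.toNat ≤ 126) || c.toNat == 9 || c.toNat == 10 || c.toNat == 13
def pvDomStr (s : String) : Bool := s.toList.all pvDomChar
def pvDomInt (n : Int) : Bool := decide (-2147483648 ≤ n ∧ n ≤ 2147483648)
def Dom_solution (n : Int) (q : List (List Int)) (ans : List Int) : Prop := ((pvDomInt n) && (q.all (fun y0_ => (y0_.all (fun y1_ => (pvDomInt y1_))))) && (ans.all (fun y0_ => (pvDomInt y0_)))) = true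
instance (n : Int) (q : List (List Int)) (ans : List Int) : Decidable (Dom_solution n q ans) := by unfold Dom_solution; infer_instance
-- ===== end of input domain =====

-- B replaces A's full enumeration of all 5-combinations (with a per-combination set-intersection
-- re-check of every query) by a backtracking search threading a running overlap count per query,
-- pruning branches whose overlap overflows or can no longer reach its target; objective: alternative.

-- ===== PORT A =====
-- the inner loop's per-query test: len(set(question) & set(comb)) == system
def checkRow (comb : List Int) (p : List Int × Int) : Bool :=
  PySem.Set.len (PySem.Set.inter (PySem.Set.ofList p.1) (PySem.Set.ofList comb)) == p.2

def solution (n : Int) (q : List (List Int)) (ans : List Int) : Int :=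
  (PySem.List.combinations (PySem.List.pyRange 1 (n + 1) 1) 5).foldl
    (fun answer comb => if (q.zip ans).all (checkRow comb) then answer + 1 else answer) 0

-- ===== PORT B =====
-- one (query-set, target, running-overlap) triple per query; the overlap is bumped on each pick
def bumpSt (st : List (List Int × Int × Int)) (v : Int) : List (List Int × Int × Int) :=
  st.map (fun t => (t.1, t.2.1, t.2.2 + if PySem.Set.contains t.1 v then 1 else 0))

def dfs (n : Int) (st : List (List Int × Int × Int)) (r : Nat) (start : Int) : Int :=
  if st.any (fun t => decide (t.2.1 < t.2.2) || decide ((r : Int) < t.2.1 - t.2.2)) then 0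
  else match r with
    | 0 => 1
    | Nat.succ r' =>
      (PySem.List.pyRange start (n + 1) 1).foldl
        (fun total v => total + dfs n (bumpSt st v) r' (v + 1)) 0
termination_by r

def solution_alt (n : Int) (q : List (List Int)) (ans : List Int) : Int :=
  dfs n ((q.zip ans).map (fun p => (PySem.Set.ofList p.1, p.2, 0))) 5 1

-- ===== PRECONDITION & SPEC =====
def Spec_solution (n : Int) (q : List (List Int)) (ans : List Int) (out : Int) : Prop := out = solution_alt n q ans
instance (n : Int) (q : List (List Int)) (ans : List Int) (out : Int) : Decidable (Spec_solution n q ans out) := by unfold Spec_solution; infer_instance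

-- ===== CLAIM (what is proved, stated in full; the proofs are below) =====
def Claim_equal_solution : Prop := ∀ (n : Int) (q : List (List Int)) (ans : List Int), Dom_solution n q ans → Spec_solution n q ans (solution n q ans)

-- ===== LEMMAS AND PROOFS =====

-- overlap of a (duplicate-free) query set s with a chosen combination comb
def ov (s comb : List Int) : Int := ((s.filter (fun x => comb.contains x)).length : Int)

-- a finished combination satisfies every query of the state
def okSt (st : List (List Int × Int × Int)) (comb : List Int) : Bool :=
  st.all (fun t => decide (t.2.2 + ov t.1 comb = t.2.1))

-- invariant: every query set in the state is duplicate-free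
def invSt (st : List (List Int × Int × Int)) : Prop := ∀ t ∈ st, t.1.Nodup

theorem beq_comm_int (v x : Int) : (v == x) = (x == v) := by
  by_cases h : x = v
  · simp [h]
  · simp [h]
    exact fun hh => h hh.symm

theorem countP_disj (s : List Int) (p q : Int → Bool)
    (h : ∀ x ∈ s, ¬(p x = true ∧ q x = true)) :
    s.countP (fun x => p x || q x) = s.countP p + s.countP q := by
  induction s with
  | nil => simp
  | cons a s ih =>
    have ha := h a (by simp)
    have ih' := ih (fun x hx => h x (by simp [hx]))
    by_cases hp : p a <;> by_cases hq : q a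
    · exact absurd ⟨hp, hq⟩ ha
    all_goals simp [hp, hq, ih']; try omega

theorem ov_cons (s comb : List Int) (v : Int) (hs : s.Nodup) (hv : v ∉ comb) :
    ov s (v :: comb) = (if s.contains v then 1 else 0) + ov s comb := by
  have h1 : s.countP (fun x => (v :: comb).contains x)
      = s.countP (fun x => x == v) + s.countP (fun x => comb.contains x) := by
    have := countP_disj s (fun x => x == v) (fun x => comb.contains x)
      (by rintro x hx ⟨h1', h2'⟩; simp at h1' h2'; exact hv (h1' ▸ h2'))
    rw [← this]
    apply List.countP_congr
    intro x hx
    simp [beq_comm_int v x]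
  have h3 : s.countP (fun x => x == v) = if s.contains v then 1 else 0 := by
    by_cases hm : v ∈ s
    · have : s.count v = 1 := List.count_eq_one_of_mem hs hm
      simpa [List.count, hm] using this
    · have : s.count v = 0 := List.count_eq_zero_of_not_mem hm
      simpa [List.count, hm] using this
  simp only [ov, List.countP_eq_length_filter.symm] at *
  rw [h1, h3]
  push_cast
  ring

theorem nodup_len_le (l l' : List Int) (h : l.Nodup) (hs : l ⊆ l') : l.length ≤ l'.length := by
  classical
  calc l.length = l.toFinset.card := (List.toFinset_card_of_nodup h).symm
  _ ≤ l'.toFinset.card := Finset.card_le_card (by intro x hx; simp at hx ⊢; exact hs hx)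
  _ ≤ l'.length := l'.toFinset_card_le

theorem ov_nil (s : List Int) : ov s [] = 0 := by
  simp [ov]

theorem ov_nonneg (s comb : List Int) : 0 ≤ ov s comb := by
  simp [ov]

theorem ov_le_length (s comb : List Int) (hs : s.Nodup) :
    ov s comb ≤ (comb.length : Int) := by
  have := nodup_len_le (s.filter (fun x => comb.contains x)) comb (hs.filter _)
    (by intro x hx; simp [List.mem_filter] at hx; simpa using hx.2)
  simpa [ov] using this

theorem invSt_bump (st : List (List Int × Int × Int)) (v : Int) (h : invSt st) :
    invSt (bumpSt st v) := by
  intro t ht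
  simp [bumpSt] at ht
  obtain ⟨u, y, b, hu, rfl⟩ := ht
  exact h (u, y, b) hu

theorem all_congr_mem {α : Type} (l : List α) (p q : α → Bool) (h : ∀ x ∈ l, p x = q x) :
    l.all p = l.all q := by
  induction l with
  | nil => rfl
  | cons a l ih => simp only [List.all_cons, h a (by simp), ih (fun x hx => h x (by simp [hx]))]

theorem okSt_cons (st : List (List Int × Int × Int)) (comb : List Int) (v : Int)
    (hst : invSt st) (hv : v ∉ comb) :
    okSt st (v :: comb) = okSt (bumpSt st v) comb := by
  simp only [okSt, bumpSt, List.all_map]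
  apply all_congr_mem
  intro t ht
  have h2 := ov_cons t.1 comb v (hst t ht) hv
  simp only [h2, PySem.Set.contains]
  by_cases hc : t.1.contains v <;> simp [hc] <;> omega

theorem countP_zero_of_prune (st : List (List Int × Int × Int)) (r : Nat) (L : List Int)
    (hst : invSt st)
    (h : st.any (fun t => decide (t.2.1 < t.2.2) || decide ((r : Int) < t.2.1 - t.2.2)) = true) :
    (PySem.List.combinations L r).countP (okSt st) = 0 := by
  rw [List.countP_eq_zero]
  intro comb hc
  have hlen : comb.length = r := PySem.List.length_of_mem_combinations hc
  simp only [List.any_eq_true, Bool.or_eq_true, decide_eq_true_eq] at h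
  obtain ⟨t, ht, hcond⟩ := h
  simp only [okSt, List.all_eq_true, not_forall]
  refine ⟨t, ht, ?_⟩
  have h0 := ov_nonneg t.1 comb
  have h1 := ov_le_length t.1 comb (hst t ht)
  rw [hlen] at h1
  simp only [decide_eq_true_eq]
  omega

theorem countP_combs_split (n : Int) (r' : Nat) :
    ∀ (k : Nat) (start : Int) (st : List (List Int × Int × Int)), invSt st →
    (n + 1 - start).toNat = k →
    (((PySem.List.combinations (PySem.List.pyRange start (n + 1) 1) (r' + 1)).countP (okSt st) : Nat) : Int)
    = ((PySem.List.pyRange start (n + 1) 1).map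
        (fun v => (((PySem.List.combinations (PySem.List.pyRange (v + 1) (n + 1) 1) r').countP (okSt (bumpSt st v)) : Nat) : Int))).sum := by
  intro k
  induction k with
  | zero =>
    intro start st hst hk
    rw [PySem.List.pyRange_one_eq_nil (by omega)]
    simp [PySem.List.combinations_nil_succ]
  | succ k ih =>
    intro start st hst hk
    have hlt : start < n + 1 := by omega
    rw [PySem.List.pyRange_one_cons hlt, PySem.List.combinations_cons_succ]
    rw [List.countP_append, List.countP_map]
    rw [List.map_cons, List.sum_cons]
    have hfirst : (PySem.List.combinations (PySem.List.pyRange (start + 1) (n + 1) 1) r').countP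
        ((okSt st) ∘ (start :: ·))
        = (PySem.List.combinations (PySem.List.pyRange (start + 1) (n + 1) 1) r').countP
          (okSt (bumpSt st start)) := by
      apply List.countP_congr
      intro comb hc
      have hsub : comb ⊆ PySem.List.pyRange (start + 1) (n + 1) 1 :=
        (PySem.List.sublist_of_mem_combinations hc).subset
      have hv : start ∉ comb := by
        intro hmem
        have := (PySem.List.mem_pyRange_one).1 (hsub hmem)
        omega
      simpa using okSt_cons st comb start hst hv
    rw [hfirst]
    push_cast
    rw [ih (start + 1) st hst (by omega)]

theorem dfs_eq (n : Int) : ∀ (r : Nat) (st : List (List Int × Int × Int)) (start : Int),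
    invSt st →
    dfs n st r start =
      (((PySem.List.combinations (PySem.List.pyRange start (n + 1) 1) r).countP (okSt st) : Nat) : Int) := by
  intro r
  induction r with
  | zero =>
    intro st start hst
    rw [dfs]
    by_cases hp : st.any (fun t => decide (t.2.1 < t.2.2) || decide (((0 : Nat) : Int) < t.2.1 - t.2.2)) = true
    · rw [if_pos hp, countP_zero_of_prune st 0 _ hst hp]
      simp
    · rw [if_neg hp]
      have hok : okSt st [] = true := by
        simp only [List.any_eq_true, Bool.or_eq_true, decide_eq_true_eq, not_exists, not_and,
          not_or] at hp
        simp only [okSt, List.all_eq_true, decide_eq_true_eq]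
        intro t ht
        have := hp t ht
        rw [ov_nil]
        omega
      simp [PySem.List.combinations_zero, hok]
  | succ r' ih =>
    intro st start hst
    rw [dfs]
    by_cases hp : st.any (fun t => decide (t.2.1 < t.2.2) || decide (((Nat.succ r' : Nat) : Int) < t.2.1 - t.2.2)) = true
    · rw [if_pos hp, countP_zero_of_prune st (r' + 1) _ hst hp]
      simp
    · rw [if_neg hp]
      rw [PySem.List.foldl_add (g := fun v => dfs n (bumpSt st v) r' (v + 1))]
      rw [countP_combs_split n r' (n + 1 - start).toNat start st hst rfl]
      rw [zero_add]
      congr 1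
      apply List.map_congr_left
      intro v hv
      exact ih (bumpSt st v) (v + 1) (invSt_bump st v hst)

theorem checkRow_eq (comb : List Int) (p : List Int × Int) :
    checkRow comb p = decide ((0 : Int) + ov (PySem.Set.ofList p.1) comb = p.2) := by
  have hf : (PySem.Set.ofList p.1).filter (fun x => (PySem.Set.ofList comb).contains x)
      = (PySem.Set.ofList p.1).filter (fun x => comb.contains x) := by
    apply List.filter_congr
    intro x _
    simp [PySem.Set.mem_ofList]
  simp only [checkRow, PySem.Set.inter, PySem.Set.len, hf, ov, zero_add]
  rw [Bool.eq_iff_iff]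
  simp

theorem solution_eq_alt (n : Int) (q : List (List Int)) (ans : List Int) :
    solution n q ans = solution_alt n q ans := by
  unfold solution solution_alt
  rw [PySem.List.foldl_if_add_one (p := fun comb => (q.zip ans).all (checkRow comb))]
  rw [dfs_eq n 5 _ 1 (by
    intro t ht
    simp only [List.mem_map] at ht
    obtain ⟨p, hp, rfl⟩ := ht
    exact PySem.Set.nodup_ofList p.1)]
  rw [zero_add]
  congr 1
  apply List.countP_congr
  intro comb _
  rw [all_congr_mem (q.zip ans) (checkRow comb)
    (fun p => decide ((0:Int) + ov (PySem.Set.ofList p.1) comb = p.2))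
    (fun p _ => checkRow_eq comb p)]
  simp only [okSt, List.all_map, Function.comp_def, zero_add]

-- ===== VERDICT (by name: the statement is the Claim_ definition above) =====
theorem solution_spec : Claim_equal_solution := by
  intro n q ans _
  unfold Spec_solution
  exact solution_eq_alt n q ans
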